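-- pv_equiv track=rewrite | github.com/Kyanji/IDS_Project | main.py | count_ports_syn
-- ===== SOURCE A (Python) =====
-- def count_ports_syn(port_list, threshold):  # return the port with the max number of connection in a "threshold" time
--     ports = port_list[1 - threshold:-1]
--     ports_count = {}
--     for i in list(set(ports)):
--         ports_count[str(i)] = 0
--
--     for i in ports:
--         ports_count[str(i)] = ports_count[str(i)] + 1
--
--     return max(ports_count.values())
-- ===== SOURCE B (Python) =====
-- def count_ports_syn(port_list, threshold):
--     # sort the window, then scan once for the longest run of equal elements
--     ports = port_list[1 - threshold:-1]
--     s = sorted(ports)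
--     if not s:
--         raise ValueError("empty window")
--     best = 1
--     run = 1
--     prev = s[0]
--     for x in s[1:]:
--         run = run + 1 if x == prev else 1
--         if run > best:
--             best = run
--         prev = x
--     return best
-- ===== Notes on version B (the rewrite author's own statement) =====
-- stated objective: alternative
-- what changed: Replaces the two dict-building passes (zero-init over set(ports), per-element str-keyed increment, then max over values) with sort-then-scan: sort the window and return the longest run of consecutive equal elements in one linear scan.
import Mathlib
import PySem

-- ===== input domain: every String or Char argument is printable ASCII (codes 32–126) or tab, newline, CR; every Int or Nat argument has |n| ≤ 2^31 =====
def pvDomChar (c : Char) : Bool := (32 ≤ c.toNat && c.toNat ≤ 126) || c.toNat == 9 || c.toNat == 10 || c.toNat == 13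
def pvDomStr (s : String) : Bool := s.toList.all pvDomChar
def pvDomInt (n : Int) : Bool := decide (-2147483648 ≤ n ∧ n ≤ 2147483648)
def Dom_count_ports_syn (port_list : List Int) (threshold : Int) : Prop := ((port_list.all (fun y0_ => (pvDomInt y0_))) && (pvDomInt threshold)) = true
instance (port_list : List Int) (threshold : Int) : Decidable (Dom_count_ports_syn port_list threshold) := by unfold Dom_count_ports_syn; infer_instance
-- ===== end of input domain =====

-- B replaces A's two dict-building passes with sort-then-scan (longest run of equal
-- elements in the sorted window); same return value on every nonempty window.

-- ===== PORT A =====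
def count_ports_syn (port_list : List Int) (threshold : Int) : Int :=
  let ports := PySem.List.slice port_list (some (1 - threshold)) (some (-1))
  let d0 : PySem.Dict String Int :=
    (PySem.Set.ofList ports).foldl (fun d i => d.insert (PySem.Int.toStr i) 0) PySem.Dict.empty
  -- second loop: ports_count[str(i)] is always present (initialised above), so the
  -- KeyError-free read is ported as getD
  let d : PySem.Dict String Int :=
    ports.foldl (fun d i => d.insert (PySem.Int.toStr i) (d.getD (PySem.Int.toStr i) 0 + 1)) d0
  -- max(ports_count.values()) raises ValueError on an empty dict; excluded by Pre_
  match PySem.List.max? (PySem.Dict.values d) (fun v => v) with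
  | some m => m
  | none => 0

-- ===== PORT B =====
-- the loop body of Source B: state (best, run, prev)
def bStep (st : Int × Int × Int) (x : Int) : Int × Int × Int :=
  let run' := if x = st.2.2 then st.2.1 + 1 else 1
  ((if st.1 < run' then run' else st.1), run', x)

def count_ports_syn_alt (port_list : List Int) (threshold : Int) : Int :=
  let ports := PySem.List.slice port_list (some (1 - threshold)) (some (-1))
  match PySem.List.sorted ports (fun x => x) with
  | [] => 0  -- Source B raises ValueError here; excluded by Pre_
  | h :: t => (t.foldl bStep (1, 1, h)).1

-- ===== PRECONDITION & SPEC =====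
-- Pre_ excludes exactly the inputs whose window port_list[1-threshold:-1] is empty:
-- there A raises ValueError (max() of an empty sequence) and Source B raises ValueError too.
def Pre_count_ports_syn (port_list : List Int) (threshold : Int) : Prop :=
  PySem.List.slice port_list (some (1 - threshold)) (some (-1)) ≠ []
instance (port_list : List Int) (threshold : Int) : Decidable (Pre_count_ports_syn port_list threshold) := by unfold Pre_count_ports_syn; infer_instance

def pvWitness_count_ports_syn : List Int × Int := ([1, 2, 2, 3], 4)

def Spec_count_ports_syn (port_list : List Int) (threshold : Int) (out : Int) : Prop := out = count_ports_syn_alt port_list threshold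
instance (port_list : List Int) (threshold : Int) (out : Int) : Decidable (Spec_count_ports_syn port_list threshold out) := by unfold Spec_count_ports_syn; infer_instance

-- ===== CLAIM (what is proved, stated in full; the proofs are below) =====
def Claim_equal_count_ports_syn : Prop := ∀ (port_list : List Int) (threshold : Int), Dom_count_ports_syn port_list threshold → Pre_count_ports_syn port_list threshold → Spec_count_ports_syn port_list threshold (count_ports_syn port_list threshold)

-- ===== LEMMAS AND PROOFS =====

-- str is injective on ints
lemma digitChar_inj_lt10 (a b : Nat) (ha : a < 10) (hb : b < 10)
    (h : Nat.digitChar a = Nat.digitChar b) : a = b := by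
  interval_cases a <;> interval_cases b <;> revert h <;> decide

lemma toDigits10_inj (m : Nat) : ∀ n, Nat.toDigits 10 m = Nat.toDigits 10 n → m = n := by
  induction m using Nat.strong_induction_on with
  | _ m ih =>
    intro n h
    rw [Nat.toDigits_eq_if (by norm_num)] at h
    rw [Nat.toDigits_eq_if (b := 10) (n := n) (by norm_num)] at h
    split_ifs at h with h1 h2 h2
    · simp only [List.cons.injEq] at h
      exact digitChar_inj_lt10 _ _ h1 h2 h.1
    · exfalso
      have hlen := congrArg List.length h
      have hpos := Nat.length_toDigits_pos (b := 10) (n := n / 10)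
      simp only [List.length_cons, List.length_append, List.length_nil] at hlen
      omega
    · exfalso
      have hlen := congrArg List.length h
      have hpos := Nat.length_toDigits_pos (b := 10) (n := m / 10)
      simp only [List.length_cons, List.length_append, List.length_nil] at hlen
      omega
    · obtain ⟨h3, h4⟩ := List.append_inj' h (by simp)
      simp only [List.cons.injEq] at h4
      have hm : m / 10 = n / 10 := ih (m / 10) (by omega) _ h3
      have hd : m % 10 = n % 10 :=
        digitChar_inj_lt10 _ _ (Nat.mod_lt _ (by norm_num)) (Nat.mod_lt _ (by norm_num)) h4.1
      omega

lemma toChars_inj : Function.Injective PySem.Int.toChars := by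
  intro a b h
  unfold PySem.Int.toChars at h
  split_ifs at h with ha hb hb
  · simp only [List.cons.injEq] at h
    have := toDigits10_inj _ _ h.2
    omega
  · exfalso
    have hm : ('-' : Char) ∈ Nat.toDigits 10 b.toNat := h ▸ List.mem_cons_self ..
    have := Nat.isDigit_of_mem_toDigits (by norm_num) (by norm_num) hm
    revert this; decide
  · exfalso
    have hm : ('-' : Char) ∈ Nat.toDigits 10 a.toNat := h ▸ List.mem_cons_self ..
    have := Nat.isDigit_of_mem_toDigits (by norm_num) (by norm_num) hm
    revert this; decide
  · have := toDigits10_inj _ _ h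
    omega

lemma toStr_inj : Function.Injective PySem.Int.toStr := by
  intro a b h
  exact toChars_inj (by
    have := congrArg String.toList h
    simpa [PySem.Int.toStr, String.toList_ofList] using this)

-- items of the zero-initialisation loop of A
lemma items_init_fold : ∀ (ks : List Int) (d : PySem.Dict String Int),
    ks.Nodup → (∀ i ∈ ks, PySem.Int.toStr i ∉ d.keys) →
    (ks.foldl (fun d i => d.insert (PySem.Int.toStr i) 0) d).items
      = d.items ++ ks.map (fun i => (PySem.Int.toStr i, (0 : Int))) := by
  intro ks
  induction ks with
  | nil => intro d _ _; simp
  | cons k ks ih =>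
    intro d hnd hfresh
    have hcon : d.contains (PySem.Int.toStr k) = false := by
      by_contra hc
      have : d.contains (PySem.Int.toStr k) = true := by
        cases hcd : d.contains (PySem.Int.toStr k) <;> simp_all
      exact hfresh k (by simp) ((PySem.Dict.contains_iff_mem_keys d _).mp this)
    have hins := PySem.Dict.items_insert_of_not_contains d (0 : Int) hcon
    simp only [List.foldl_cons]
    rw [ih (d.insert (PySem.Int.toStr k) 0) (List.Nodup.of_cons hnd), hins]
    · simp
    · intro i hi
      have hmemk : (d.insert (PySem.Int.toStr k) 0).keys
          = d.keys ++ [PySem.Int.toStr k] := by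
        simp [PySem.Dict.keys, hins]
      rw [hmemk]
      simp only [List.mem_append, List.mem_singleton]
      rintro (hk | hk)
      · exact hfresh i (List.mem_cons_of_mem _ hi) hk
      · have : i = k := toStr_inj hk
        subst this
        exact (List.nodup_cons.mp hnd).1 hi

-- items of the counting loop of A (every processed key already present)
lemma items_inc_fold : ∀ (l : List String) (d : PySem.Dict String Int),
    d.keys.Nodup → (∀ x ∈ l, x ∈ d.keys) →
    (l.foldl (fun d x => d.insert x (d.getD x 0 + 1)) d).items
      = d.items.map (fun p => (p.1, p.2 + (l.count p.1 : Int))) := by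
  intro l
  induction l with
  | nil => intro d _ _; simp
  | cons x l ih =>
    intro d hnd hmem
    have hcon : d.contains x = true :=
      (PySem.Dict.contains_iff_mem_keys d x).mpr (hmem x (by simp))
    have hkeys := PySem.Dict.keys_insert_of_contains d (d.getD x 0 + 1) hcon
    simp only [List.foldl_cons]
    rw [ih (d.insert x (d.getD x 0 + 1)) (by rw [hkeys]; exact hnd)
        (by intro y hy; rw [hkeys]; exact hmem y (List.mem_cons_of_mem _ hy))]
    rw [PySem.Dict.items_insert_of_contains d _ hcon]
    rw [List.map_map]
    apply List.map_congr_left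
    intro p hp
    by_cases hpx : p.1 = x
    · have hval : d.getD p.1 0 = p.2 :=
        PySem.Dict.getD_of_mem_items d (by exact hp) hnd 0
      subst hpx
      simp only [Function.comp, beq_self_eq_true, List.count_cons]
      simp [hval]
      ring
    · have : (p.1 == x) = false := by simp [hpx]
      simp only [Function.comp, this, Bool.false_eq_true]
      simp [List.count_cons]
      exact fun h => hpx h.symm

-- the values of A's finished counter: one count per distinct window element
lemma values_final (ports : List Int) :
    PySem.Dict.values
      (ports.foldl (fun d i => d.insert (PySem.Int.toStr i) (d.getD (PySem.Int.toStr i) 0 + 1))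
        ((PySem.Set.ofList ports).foldl (fun d i => d.insert (PySem.Int.toStr i) 0) PySem.Dict.empty))
      = (PySem.Set.ofList ports).map (fun i => (ports.count i : Int)) := by
  have hinit := items_init_fold (PySem.Set.ofList ports) PySem.Dict.empty
    (PySem.Set.nodup_ofList ports) (by simp [PySem.Dict.keys, PySem.Dict.empty])
  set d0 : PySem.Dict String Int :=
    (PySem.Set.ofList ports).foldl (fun d i => d.insert (PySem.Int.toStr i) 0) PySem.Dict.empty with hd0
  have hitems0 : d0.items = (PySem.Set.ofList ports).map (fun i => (PySem.Int.toStr i, (0 : Int))) := by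
    simpa [PySem.Dict.empty] using hinit
  have hkeys0 : d0.keys = (PySem.Set.ofList ports).map PySem.Int.toStr := by
    simp [PySem.Dict.keys, hitems0, List.map_map, Function.comp]
  have hlfold : ports.foldl (fun d i => d.insert (PySem.Int.toStr i) (d.getD (PySem.Int.toStr i) 0 + 1)) d0
      = (ports.map PySem.Int.toStr).foldl (fun d x => d.insert x (d.getD x 0 + 1)) d0 := by
    rw [List.foldl_map]
  have hnd0 : d0.keys.Nodup := by
    rw [hkeys0]
    exact (PySem.Set.nodup_ofList ports).map toStr_inj
  have hmem0 : ∀ x ∈ ports.map PySem.Int.toStr, x ∈ d0.keys := by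
    intro x hx
    rw [hkeys0]
    obtain ⟨i, hi, rfl⟩ := List.mem_map.mp hx
    exact List.mem_map_of_mem ((PySem.Set.mem_ofList ports i).mpr hi)
  have hfinal := items_inc_fold (ports.map PySem.Int.toStr) d0 hnd0 hmem0
  rw [PySem.Dict.values, hlfold, hfinal, hitems0, List.map_map, List.map_map]
  apply List.map_congr_left
  intro i hi
  simp only [Function.comp]
  rw [List.count_map_of_injective _ _ toStr_inj]
  simp

-- any element of a ≤-sorted list is ≤ its last element
lemma le_getLast?_of_pairwise : ∀ (l : List Int) (m : Int), l.Pairwise (· ≤ ·) →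
    l.getLast? = some m → ∀ x ∈ l, x ≤ m := by
  intro l
  induction l using List.reverseRecOn with
  | nil => simp
  | append_singleton l a ih =>
    intro m hp hm x hx
    rw [List.getLast?_concat] at hm
    have ham : a = m := by simpa using hm
    subst ham
    rcases List.mem_append.mp hx with hx | hx
    · exact ((List.pairwise_append.mp hp).2.2 x hx a (by simp))
    · simp at hx; omega

-- invariant of B's run-length scan over a sorted list: prev is the last element,
-- run is its count, best is the count of some element and bounds every count
lemma scan_inv (h : Int) (t : List Int) (hp : (h :: t).Pairwise (· ≤ ·)) :
    (h :: t).getLast? = some ((t.foldl bStep (1, 1, h)).2.2)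
  ∧ (t.foldl bStep (1, 1, h)).2.1 = (((h :: t).count ((t.foldl bStep (1, 1, h)).2.2) : Nat) : Int)
  ∧ (∃ x ∈ h :: t, (t.foldl bStep (1, 1, h)).1 = (((h :: t).count x : Nat) : Int))
  ∧ ∀ x ∈ h :: t, (((h :: t).count x : Nat) : Int) ≤ (t.foldl bStep (1, 1, h)).1 := by
  induction t using List.reverseRecOn with
  | nil =>
    refine ⟨rfl, by simp, ⟨h, by simp, by simp⟩, ?_⟩
    intro x hx; simp at hx; subst hx; simp
  | append_singleton t x ih =>
    have hcons : h :: (t ++ [x]) = (h :: t) ++ [x] := by simp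
    rw [hcons] at hp ⊢
    have hp' : (h :: t).Pairwise (· ≤ ·) :=
      hp.sublist (List.sublist_append_left _ _)
    have hub : ∀ y ∈ h :: t, y ≤ x := by
      intro y hy
      exact (List.pairwise_append.mp hp).2.2 y hy x (by simp)
    obtain ⟨hprev, hrun, ⟨w, hw, hbestw⟩, hbound⟩ := ih hp'
    rw [List.foldl_append, List.foldl_cons, List.foldl_nil]
    set st := t.foldl bStep (1, 1, h) with hst
    have hlast : ((h :: t) ++ [x]).getLast? = some x := List.getLast?_concat
    by_cases hx : x = st.2.2
    · -- x continues the last run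
      have hcount : ∀ z : Int, ((h :: t) ++ [x]).count z
          = (h :: t).count z + if z = x then 1 else 0 := by
        intro z
        rw [List.count_append]
        by_cases hz : z = x
        · simp [hz, List.count_cons]
        · simp only [List.count_cons, List.count_nil, if_neg hz]
          simp
          exact fun hh => hz hh.symm
      constructor
      · exact hlast
      refine ⟨?_, ?_, ?_⟩
      · -- run component
        simp only [bStep, if_pos hx]
        rw [hcount x, if_pos rfl]
        push_cast
        rw [hx, ← hrun]
      · -- exists
        by_cases hbr : st.1 < st.2.1 + 1
        · refine ⟨x, List.mem_append_right _ (by simp), ?_⟩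
          simp only [bStep, if_pos hx, if_pos hbr]
          rw [hcount x, if_pos rfl]
          push_cast
          rw [hx, ← hrun]
        · refine ⟨w, List.mem_append_left _ hw, ?_⟩
          simp only [bStep, if_pos hx, if_neg hbr]
          have hwx : w ≠ x := by
            intro hwx
            rw [hwx, hx, ← hrun] at hbestw
            omega
          rw [hcount w, if_neg hwx]
          push_cast
          simpa using hbestw
      · -- bound
        intro z hz
        rw [hcount z]
        have hcx2 : st.2.1 = (((h :: t).count x : Nat) : Int) := by rw [hrun, hx]
        by_cases hzx : z = x
        · subst hzx
          rw [if_pos rfl]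
          simp only [bStep, if_pos hx]
          by_cases hbr : st.1 < st.2.1 + 1
          · simp only [if_pos hbr]; push_cast at hcx2 ⊢; omega
          · simp only [if_neg hbr]; push_cast at hcx2 ⊢; omega
        · have hzz : z ∈ h :: t := by
            rcases List.mem_append.mp hz with hzz | hzz
            · exact hzz
            · simp at hzz; exact absurd hzz hzx
          have hb := hbound z hzz
          simp only [if_neg hzx, add_zero]
          simp only [bStep, if_pos hx]
          by_cases hbr : st.1 < st.2.1 + 1
          · simp only [if_pos hbr]; push_cast at hb hcx2 ⊢; omega
          · simp only [if_neg hbr]; exact hb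
    · -- new run of length 1; x cannot already occur in h :: t
      have hxt : x ∉ h :: t := by
        intro hmem
        have h1 : x ≤ st.2.2 :=
          le_getLast?_of_pairwise _ _ hp' hprev x hmem
        have h2 : st.2.2 ≤ x := hub _ (List.mem_of_getLast? hprev)
        omega
      have hcount : ∀ z : Int, z ≠ x → ((h :: t) ++ [x]).count z = (h :: t).count z := by
        intro z hzx
        rw [List.count_append]
        simp only [List.count_cons, List.count_nil]
        simp
        exact fun hh => hzx hh.symm
      have hcx : ((h :: t) ++ [x]).count x = 1 := by
        rw [List.count_append]
        simp [List.count_eq_zero_of_not_mem hxt]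
      have hbest1 : (1 : Int) ≤ st.1 := by
        rw [hbestw]
        have : 0 < (h :: t).count w := List.count_pos_iff.mpr hw
        omega
      have hnb : ¬ st.1 < 1 := by omega
      constructor
      · exact hlast
      refine ⟨?_, ?_, ?_⟩
      · simp only [bStep, if_neg hx]
        rw [hcx]; simp
      · refine ⟨w, List.mem_append_left _ hw, ?_⟩
        have hwx : w ≠ x := fun hh => hxt (hh ▸ hw)
        simp only [bStep, if_neg hx, if_neg hnb]
        rw [hcount w hwx]
        exact hbestw
      · intro z hz
        simp only [bStep, if_neg hx, if_neg hnb]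
        by_cases hzx : z = x
        · subst hzx; rw [hcx]; push_cast; omega
        · have hzz : z ∈ h :: t := by
            rcases List.mem_append.mp hz with hzz | hzz
            · exact hzz
            · simp at hzz; exact absurd hzz hzx
          rw [hcount z hzx]
          exact hbound z hzz

-- the core equality, stated on the shared window
lemma main_eq (ports : List Int) (hne : ports ≠ []) :
    (match PySem.List.max? (PySem.Dict.values
        (ports.foldl (fun d i => d.insert (PySem.Int.toStr i) (d.getD (PySem.Int.toStr i) 0 + 1))
          ((PySem.Set.ofList ports).foldl (fun d i => d.insert (PySem.Int.toStr i) 0)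
            (PySem.Dict.empty : PySem.Dict String Int))))
        (fun v => v) with
     | some m => m
     | none => 0)
      = (match PySem.List.sorted ports (fun x => x) with
         | [] => (0 : Int)
         | h :: t => (t.foldl bStep (1, 1, h)).1) := by
  obtain ⟨h, t, hs⟩ : ∃ h t, PySem.List.sorted ports (fun x => x) = h :: t := by
    cases hsv : PySem.List.sorted ports (fun x => x) with
    | nil => exact absurd ((PySem.List.sorted_eq_nil_iff ports _ false).mp hsv) hne
    | cons a b => exact ⟨a, b, rfl⟩
  have hperm : (h :: t).Perm ports := by
    have := PySem.List.sorted_perm ports (fun x => x) false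
    rwa [hs] at this
  have hpair : (h :: t).Pairwise (· ≤ ·) := by
    have := PySem.List.sorted_pairwise ports (fun x => x)
    rwa [hs] at this
  obtain ⟨_, _, ⟨w, hw, hbw⟩, hbd⟩ := scan_inv h t hpair
  rw [values_final ports, hs]
  cases hmax : PySem.List.max? ((PySem.Set.ofList ports).map fun i => (ports.count i : Int)) (fun v => v) with
  | none =>
    exfalso
    have hnil := (PySem.List.max?_eq_none_iff _ _).mp hmax
    obtain ⟨a, ha⟩ := List.exists_mem_of_ne_nil ports hne
    have : (ports.count a : Int) ∈ ((PySem.Set.ofList ports).map fun i => (ports.count i : Int)) :=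
      List.mem_map_of_mem ((PySem.Set.mem_ofList ports a).mpr ha)
    rw [hnil] at this
    exact absurd this (List.not_mem_nil)
  | some m =>
    obtain ⟨e, he, rfl⟩ := List.mem_map.mp (PySem.List.max?_mem hmax)
    have hmax' := PySem.List.max?_isMax hmax
    have he' : e ∈ ports := (PySem.Set.mem_ofList ports e).mp he
    have h1 : ((ports.count e : Nat) : Int) ≤ (t.foldl bStep (1, 1, h)).1 := by
      have := hbd e (hperm.mem_iff.mpr he')
      rwa [hperm.count_eq e] at this
    have h2 : (t.foldl bStep (1, 1, h)).1 ≤ ((ports.count e : Nat) : Int) := by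
      rw [hbw, hperm.count_eq w]
      have hw' : w ∈ ports := hperm.subset hw
      exact hmax' _ (List.mem_map_of_mem ((PySem.Set.mem_ofList ports w).mpr hw'))
    show ((ports.count e : Nat) : Int) = (t.foldl bStep (1, 1, h)).1
    omega

-- ===== VERDICT (by name: the statement is the Claim_ definition above) =====
theorem count_ports_syn_spec : Claim_equal_count_ports_syn := by
  intro port_list threshold _ hpre
  show count_ports_syn port_list threshold = count_ports_syn_alt port_list threshold
  exact main_eq (PySem.List.slice port_list (some (1 - threshold)) (some (-1))) hpre
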